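-- pv_equiv track=rewrite | github.com/ericfunman/Consultator | app/pages_modules/dashboard_page.py | _organize_widgets_by_position
-- ===== SOURCE A (Python) =====
-- from typing import Dict, List, Optional, Tuple
--
-- def _organize_widgets_by_position(widgets: List[Dict]) -> Dict[int, List[Dict]]:
--     """Organise les widgets par ligne selon leur position Y"""
--     widgets_by_row = {}
--     for widget in widgets:
--         row = widget["position_y"]
--         if row not in widgets_by_row:
--             widgets_by_row[row] = []
--         widgets_by_row[row].append(widget)
--     return widgets_by_row
-- ===== SOURCE B (Python) =====
-- def _organize_widgets_by_position(widgets):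
--     """Organise les widgets par ligne selon leur position Y"""
--     rows = list(dict.fromkeys(w["position_y"] for w in widgets))
--     return {row: [w for w in widgets if w["position_y"] == row] for row in rows}
-- ===== Notes on version B (the rewrite author's own statement) =====
-- stated objective: alternative
-- what changed: Replaces the single pass that mutates a growing dict entry-by-entry with a two-phase decomposition: first collect the distinct rows in encounter order (dict.fromkeys), then build each group by a per-row filter comprehension.
import Mathlib
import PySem

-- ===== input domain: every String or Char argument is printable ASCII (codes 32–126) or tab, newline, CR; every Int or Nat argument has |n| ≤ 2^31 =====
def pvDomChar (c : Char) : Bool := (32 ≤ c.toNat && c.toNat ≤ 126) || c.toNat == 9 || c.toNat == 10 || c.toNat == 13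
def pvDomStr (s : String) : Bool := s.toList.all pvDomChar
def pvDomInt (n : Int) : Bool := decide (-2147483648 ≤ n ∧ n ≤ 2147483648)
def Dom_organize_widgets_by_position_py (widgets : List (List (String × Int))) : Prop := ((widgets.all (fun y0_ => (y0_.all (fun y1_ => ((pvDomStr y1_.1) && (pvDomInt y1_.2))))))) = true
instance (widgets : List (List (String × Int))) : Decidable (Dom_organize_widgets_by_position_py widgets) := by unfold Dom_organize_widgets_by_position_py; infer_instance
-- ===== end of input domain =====

-- B replaces A's single dict-mutating pass by a two-phase decomposition (distinct rows in encounter order, then a per-row filter); not faster, an alternative algorithm.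


-- ===== PORT A =====
-- one step of A's loop body: `if row not in d: d[row] = []` then `d[row].append(widget)`
def pvAStep (d : PySem.Dict Int (List (List (String × Int)))) (row : Int)
    (w : List (String × Int)) : PySem.Dict Int (List (List (String × Int))) :=
  let d1 := if d.contains row then d else d.insert row []
  d1.modify row [] (fun v => v ++ [w])

-- A's `for widget in widgets` loop; `widget["position_y"]` may raise KeyError (none)
def pvALoop : List (List (String × Int)) → PySem.Dict Int (List (List (String × Int))) →
    Option (PySem.Dict Int (List (List (String × Int))))
  | [], d => some d
  | w :: ws, d =>
    match (PySem.Dict.mk w).get? "position_y" with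
    | none => none
    | some row => pvALoop ws (pvAStep d row w)

def organize_widgets_by_position_py (widgets : List (List (String × Int))) : List (Int × List (List (String × Int))) :=
  match pvALoop widgets PySem.Dict.empty with
  | some d => d.items
  | none => []  -- unreachable under Pre_ (KeyError in Python)

-- ===== PORT B =====
-- `w["position_y"]` in B (KeyError = none)
def pvBRow (w : List (String × Int)) : Option Int := (PySem.Dict.mk w).get? "position_y"

def organize_widgets_by_position_py_alt (widgets : List (List (String × Int))) : List (Int × List (List (String × Int))) :=
  match widgets.mapM pvBRow with
  | none => []  -- unreachable under Pre_ (KeyError in Python)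
  | some rows =>
    (PySem.List.dedup rows).map
      (fun r => (r, widgets.filter (fun w => pvBRow w == some r)))

-- ===== PRECONDITION & SPEC =====
-- Pre_ excludes exactly the inputs where some widget lacks the "position_y" key: there Python A raises KeyError.
def Pre_organize_widgets_by_position_py (widgets : List (List (String × Int))) : Prop :=
  ∀ w ∈ widgets, ((PySem.Dict.mk w).get? "position_y").isSome = true
instance (widgets : List (List (String × Int))) : Decidable (Pre_organize_widgets_by_position_py widgets) := by unfold Pre_organize_widgets_by_position_py; infer_instance

def pvWitness_organize_widgets_by_position_py : (List (List (String × Int))) :=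
  [[("position_y", 2), ("a", 1)], [("position_y", 1)], [("position_y", 2), ("b", 3)]]

def Spec_organize_widgets_by_position_py (widgets : List (List (String × Int))) (out : List (Int × List (List (String × Int)))) : Prop := out = organize_widgets_by_position_py_alt widgets
instance (widgets : List (List (String × Int))) (out : List (Int × List (List (String × Int)))) : Decidable (Spec_organize_widgets_by_position_py widgets out) := by unfold Spec_organize_widgets_by_position_py; infer_instance

-- ===== CLAIM (what is proved, stated in full; the proofs are below) =====
def Claim_equal_organize_widgets_by_position_py : Prop := ∀ (widgets : List (List (String × Int))), Dom_organize_widgets_by_position_py widgets → Pre_organize_widgets_by_position_py widgets → Spec_organize_widgets_by_position_py widgets (organize_widgets_by_position_py widgets)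

-- ===== LEMMAS AND PROOFS =====

-- the row of a widget, total under Pre_
def pvKey (w : List (String × Int)) : Int := ((PySem.Dict.mk w).get? "position_y").getD 0

theorem pvBRow_eq (w : List (String × Int))
    (h : ((PySem.Dict.mk w).get? "position_y").isSome = true) :
    pvBRow w = some (pvKey w) := by
  unfold pvBRow pvKey
  cases hg : (PySem.Dict.mk w).get? "position_y" with
  | none => rw [hg] at h; simp at h
  | some r => simp

theorem pvMapM_eq (ws : List (List (String × Int)))
    (h : ∀ w ∈ ws, ((PySem.Dict.mk w).get? "position_y").isSome = true) :
    ws.mapM pvBRow = some (ws.map pvKey) := by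
  induction ws with
  | nil => rfl
  | cons w ws ih =>
    rw [List.mapM_cons, pvBRow_eq w (h w (by simp)), ih (fun x hx => h x (by simp [hx]))]
    rfl

-- A's if/append step collapses to a single modify
theorem pvAStep_eq (d : PySem.Dict Int (List (List (String × Int)))) (row : Int)
    (w : List (String × Int)) :
    pvAStep d row w = d.modify row [] (fun v => v ++ [w]) := by
  unfold pvAStep
  by_cases h : d.contains row = true
  · simp [h]
  · have h' : d.contains row = false := by simpa using h
    simp only [h', Bool.false_eq_true, if_false]
    have hn : d.get? row = none := by
      have := PySem.Dict.contains_eq_isSome_get? (d := d) (k := row)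
      rw [h'] at this
      exact Option.not_isSome_iff_eq_none.mp (by simp [← this])
    have hg : d.getD row ([] : List (List (String × Int))) = [] := by
      rw [PySem.Dict.getD_eq_get?_getD, hn]; rfl
    show (d.insert row []).insert row (((d.insert row []).getD row []) ++ [w])
        = d.insert row ((d.getD row []) ++ [w])
    rw [PySem.Dict.getD_insert_self, PySem.Dict.insert_insert_self, hg]

-- the Option-threaded loop is total under Pre_ and equals a plain modify-fold
theorem pvALoop_eq (ws : List (List (String × Int)))
    (d : PySem.Dict Int (List (List (String × Int))))
    (h : ∀ w ∈ ws, ((PySem.Dict.mk w).get? "position_y").isSome = true) :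
    pvALoop ws d = some (ws.foldl (fun d w => d.modify (pvKey w) [] (fun v => v ++ [w])) d) := by
  induction ws generalizing d with
  | nil => rfl
  | cons w ws ih =>
    have hw := h w (by simp)
    have hg : (PySem.Dict.mk w).get? "position_y" = some (pvKey w) := by
      cases hgg : (PySem.Dict.mk w).get? "position_y" with
      | none => rw [hgg] at hw; simp at hw
      | some r => unfold pvKey; rw [hgg]; rfl
    rw [List.foldl_cons]
    show (match (PySem.Dict.mk w).get? "position_y" with
      | none => none
      | some row => pvALoop ws (pvAStep d row w)) = _
    rw [hg]
    show pvALoop ws (pvAStep d (pvKey w) w) = _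
    rw [pvAStep_eq, ih _ (fun x hx => h x (by simp [hx]))]

theorem organize_widgets_by_position_py_spec' (widgets : List (List (String × Int)))
    (hpre : Pre_organize_widgets_by_position_py widgets) :
    organize_widgets_by_position_py widgets = organize_widgets_by_position_py_alt widgets := by
  unfold organize_widgets_by_position_py organize_widgets_by_position_py_alt
  rw [pvALoop_eq widgets PySem.Dict.empty hpre, pvMapM_eq widgets hpre]
  set F := widgets.foldl (fun d w => d.modify (pvKey w) [] (fun v => v ++ [w])) PySem.Dict.empty with hF
  have hkeys : F.keys = PySem.Set.ofList (widgets.map pvKey) := by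
    rw [hF, PySem.Dict.keys_foldl_modify_key, PySem.Dict.keys_empty, PySem.Set.update_nil_left]
  have hnodup : F.keys.Nodup := by rw [hkeys]; exact PySem.Set.nodup_ofList _
  have hgetD : ∀ r : Int, F.getD r [] = widgets.filter (fun w => pvKey w == r) := by
    intro r
    rw [hF]
    have : widgets.foldl (fun d w => d.modify (pvKey w) [] (fun v => v ++ [w])) PySem.Dict.empty
        = (widgets.map (fun w => (pvKey w, w))).foldl
            (fun d p => d.modify p.1 [] (fun v => v ++ [p.2])) PySem.Dict.empty := by
      rw [List.foldl_map]
    rw [this, PySem.Dict.getD_foldl_modify_append, PySem.Dict.getD_empty, List.filter_map]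
    simp [Function.comp_def]
  have hitems : F.items = F.keys.map (fun k => (k, F.getD k [])) :=
    PySem.Dict.items_eq_map_keys F hnodup []
  show F.items = (PySem.List.dedup (widgets.map pvKey)).map
      (fun r => (r, widgets.filter (fun w => pvBRow w == some r)))
  rw [hitems, hkeys]
  simp only [PySem.List.dedup_eq_ofList]
  apply List.map_congr_left
  intro r hr
  rw [hgetD r]
  congr 1
  apply List.filter_congr
  intro w hw
  rw [pvBRow_eq w (hpre w hw)]
  simp

-- ===== VERDICT (by name: the statement is the Claim_ definition above) =====
theorem organize_widgets_by_position_py_spec : Claim_equal_organize_widgets_by_position_py := by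
  intro widgets _ hpre
  exact organize_widgets_by_position_py_spec' widgets hpre
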